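-- pv_equiv track=rewrite | github.com/harjassand/AGI-Stack-Unchained | Extension-1/CDEL/bench/interleave_streams.py | interleave
-- ===== SOURCE A (Python) =====
-- def interleave(main: list[str], extra: list[str], k: int) -> list[str]:
--     out: list[str] = []
--     extra_idx = 0
--     for line in main:
--         out.append(line)
--         for _ in range(k):
--             if extra_idx >= len(extra):
--                 break
--             out.append(extra[extra_idx])
--             extra_idx += 1
--     if extra_idx < len(extra):
--         out.extend(extra[extra_idx:])
--     return out
-- ===== SOURCE B (Python) =====
-- def interleave(main: list[str], extra: list[str], k: int) -> list[str]:
--     if k <= 0: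
--         return list(main) + list(extra)
--     chunks = [extra[i:i + k] for i in range(0, len(extra), k)]
--     out: list[str] = []
--     for line, chunk in zip(main, chunks):
--         out.append(line)
--         out.extend(chunk)
--     n = min(len(main), len(chunks))
--     out.extend(main[n:])
--     for chunk in chunks[n:]:
--         out.extend(chunk)
--     return out
-- ===== Notes on version B (the rewrite author's own statement) =====
-- stated objective: alternative
-- what changed: B first builds a chunk table extra[i:i+k] (handling k<=0 up front as main+extra), then does a zip-style merge of main with the chunk list plus leftover tails, instead of A's streaming single-index consumption of extra inside a nested loop.
import Mathlib
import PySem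

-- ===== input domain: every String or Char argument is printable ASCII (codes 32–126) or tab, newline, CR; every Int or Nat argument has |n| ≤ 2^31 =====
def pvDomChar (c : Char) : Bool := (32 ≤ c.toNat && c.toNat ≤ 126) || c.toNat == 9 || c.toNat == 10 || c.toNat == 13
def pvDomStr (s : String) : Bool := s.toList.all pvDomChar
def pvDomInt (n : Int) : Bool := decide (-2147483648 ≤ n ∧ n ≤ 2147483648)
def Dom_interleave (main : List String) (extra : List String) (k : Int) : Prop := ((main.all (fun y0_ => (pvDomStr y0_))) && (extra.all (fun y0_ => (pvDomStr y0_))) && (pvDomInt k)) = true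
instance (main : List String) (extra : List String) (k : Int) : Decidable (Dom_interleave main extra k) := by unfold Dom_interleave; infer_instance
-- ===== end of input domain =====

-- B replaces A's streaming extra-index consumption by a chunk table zipped against main
-- (objective: alternative decomposition, same cost); both proved equal on all inputs.

-- ===== PORT A =====
-- inner 'for _ in range(k): if extra_idx >= len(extra): break; out.append(extra[extra_idx]); extra_idx += 1'
-- range(k) performs k.toNat iterations; the guard ensures idx < extra.length, so getD is exact for extra[extra_idx].
def interleaveInner (extra : List String) : Nat → List String → Nat → List String × Nat
  | 0, out, idx => (out, idx)
  | Nat.succ n, out, idx =>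
      if extra.length ≤ idx then (out, idx)
      else interleaveInner extra n (out ++ [extra.getD idx ""]) (idx + 1)

def interleave (main : List String) (extra : List String) (k : Int) : List String :=
  let st := main.foldl (fun (st : List String × Nat) line =>
      interleaveInner extra k.toNat (st.1 ++ [line]) st.2) (([] : List String), 0)
  -- extra[extra_idx:] with a nonnegative index is List.drop (exact)
  if st.2 < extra.length then st.1 ++ extra.drop st.2 else st.1

-- ===== PORT B =====
def interleave_alt (main : List String) (extra : List String) (k : Int) : List String :=
  if k ≤ 0 then main ++ extra
  else
    -- chunks = [extra[i:i+k] for i in range(0, len(extra), k)]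
    let chunks := (PySem.List.pyRange 0 (extra.length : Int) k).map
        (fun i => PySem.List.slice extra (some i) (some (i + k)))
    -- for line, chunk in zip(main, chunks): out.append(line); out.extend(chunk)
    let out := (main.zip chunks).foldl (fun o p => (o ++ [p.1]) ++ p.2) []
    let n := min main.length chunks.length
    -- main[n:] / chunks[n:] with nonnegative n are List.drop (exact)
    (out ++ main.drop n) ++ (chunks.drop n).foldl (fun o c => o ++ c) []

-- ===== PRECONDITION & SPEC =====
def Spec_interleave (main : List String) (extra : List String) (k : Int) (out : List String) : Prop := out = interleave_alt main extra k
instance (main : List String) (extra : List String) (k : Int) (out : List String) : Decidable (Spec_interleave main extra k out) := by unfold Spec_interleave; infer_instance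

-- ===== CLAIM (what is proved, stated in full; the proofs are below) =====
def Claim_equal_interleave : Prop := ∀ (main : List String) (extra : List String) (k : Int), Dom_interleave main extra k → Spec_interleave main extra k (interleave main extra k)

-- ===== LEMMAS AND PROOFS =====

-- canonical form both programs are reduced to: one main line, then up to kn extras, recurse
def specF (kn : Nat) : List String → List String → List String
  | [], ex => ex
  | m :: ms, ex => m :: (ex.take kn ++ specF kn ms (ex.drop kn))

theorem specF_zero (ms ex : List String) : specF 0 ms ex = ms ++ ex := by
  induction ms with
  | nil => rfl
  | cons m ms ih => simp [specF, ih]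

theorem specF_nil (kn : Nat) (ms : List String) : specF kn ms [] = ms := by
  induction ms with
  | nil => rfl
  | cons m ms ih => simp [specF, ih]

-- ===== A-side =====
theorem interleaveInner_eq (extra : List String) (n : Nat) :
    ∀ out idx, idx ≤ extra.length →
      interleaveInner extra n out idx
        = (out ++ (extra.drop idx).take n, min (idx + n) extra.length) := by
  induction n with
  | zero => intro out idx h; simp [interleaveInner]; omega
  | succ n ih =>
      intro out idx h
      by_cases hge : extra.length ≤ idx
      · have hidx : idx = extra.length := le_antisymm h hge
        subst hidx
        rw [interleaveInner, if_pos hge]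
        simp [List.drop_length]
      · have hlt : idx < extra.length := by omega
        have hdrop : extra.drop idx = extra[idx] :: extra.drop (idx + 1) :=
          List.drop_eq_getElem_cons hlt
        rw [interleaveInner, if_neg hge, ih _ _ (by omega)]
        rw [List.getD_eq_getElem _ _ hlt, hdrop]
        simp only [List.take_succ_cons, Prod.mk.injEq]
        exact ⟨by simp, by omega⟩

theorem interleaveFold_eq (extra : List String) (kn : Nat) (main : List String) :
    ∀ (out : List String) (idx : Nat), idx ≤ extra.length →
      (main.foldl (fun (st : List String × Nat) line =>
          interleaveInner extra kn (st.1 ++ [line]) st.2) (out, idx)).2 ≤ extra.length ∧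
      (main.foldl (fun (st : List String × Nat) line =>
          interleaveInner extra kn (st.1 ++ [line]) st.2) (out, idx)).1
        ++ extra.drop ((main.foldl (fun (st : List String × Nat) line =>
          interleaveInner extra kn (st.1 ++ [line]) st.2) (out, idx)).2)
        = out ++ specF kn main (extra.drop idx) := by
  induction main with
  | nil => intro out idx h; simpa [specF] using h
  | cons m ms ih =>
      intro out idx h
      rw [List.foldl_cons, interleaveInner_eq extra kn _ _ h]
      have hidx' : min (idx + kn) extra.length ≤ extra.length := by omega
      obtain ⟨h1, h2⟩ := ih (out ++ [m] ++ (extra.drop idx).take kn) (min (idx + kn) extra.length) hidx'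
      refine ⟨h1, ?_⟩
      have hdropmin : extra.drop (min (idx + kn) extra.length) = extra.drop (idx + kn) := by
        by_cases hc : idx + kn ≤ extra.length
        · rw [min_eq_left hc]
        · rw [List.drop_eq_nil_of_le (by omega), List.drop_eq_nil_of_le (by omega)]
      rw [hdropmin] at h2
      have hdd : (extra.drop idx).drop kn = extra.drop (idx + kn) := by
        rw [List.drop_drop]
      rw [h2, specF, ← hdd]
      simp [List.append_assoc]

theorem interleave_eq_specF (main extra : List String) (k : Int) :
    interleave main extra k = specF k.toNat main extra := by
  unfold interleave
  obtain ⟨h1, h2⟩ := interleaveFold_eq extra k.toNat main [] 0 (by omega)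
  set st := main.foldl (fun (st : List String × Nat) line =>
      interleaveInner extra k.toNat (st.1 ++ [line]) st.2) (([] : List String), 0) with hst
  simp only [List.drop_zero, List.nil_append] at h2
  by_cases hc : st.2 < extra.length
  · simpa [hc] using h2
  · have : extra.drop st.2 = [] := List.drop_eq_nil_of_le (by omega)
    rw [this, List.append_nil] at h2
    simpa [hc] using h2

-- ===== B-side =====
-- the chunk table in index form
def chunkAt (extra : List String) (a : Nat) (j : Nat) : List String := (extra.drop (a * j)).take a

def cnt (a : Nat) (L : Nat) : Nat :=
  if 0 < L then (((L : Int) + a - 1) / (a : Int)).toNat else 0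

def chunksL (a : Nat) (extra : List String) : List (List String) :=
  (List.range (cnt a extra.length)).map (chunkAt extra a)

theorem chunks_eq (extra : List String) (a : Nat) (ha : 0 < a) :
    (PySem.List.pyRange 0 (extra.length : Int) (a : Int)).map
        (fun i => PySem.List.slice extra (some i) (some (i + (a : Int))))
      = chunksL a extra := by
  rw [PySem.List.pyRange_of_pos 0 (extra.length : Int) (by exact_mod_cast ha), List.map_map]
  unfold chunksL cnt
  have hcond : ((0 : Int) < (extra.length : Int)) ↔ 0 < extra.length := by exact_mod_cast Iff.rfl
  have hcnt : (if (0:Int) < (extra.length : Int) then (((extra.length : Int) - 0 + a - 1) / a).toNat else 0)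
      = (if 0 < extra.length then (((extra.length : Int) + (a:Int) - 1) / (a : Int)).toNat else 0) := by
    by_cases hL : 0 < extra.length
    · rw [if_pos (by exact_mod_cast hL), if_pos hL]; ring_nf
    · rw [if_neg (by exact_mod_cast hL), if_neg hL]
  rw [hcnt]
  apply List.map_congr_left
  intro j _
  have h1 : (0 : Int) + (a : Int) * (j : Int) = ((a * j : Nat) : Int) := by push_cast; ring
  simp only [Function.comp]
  rw [h1, PySem.List.slice_natCast_add]
  rfl

theorem cnt_step (a L : Nat) (ha : 0 < a) (hL : 0 < L) : cnt a L = cnt a (L - a) + 1 := by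
  have haZ : (0 : Int) < (a : Int) := by exact_mod_cast ha
  have haz : (a : Int) ≠ 0 := by omega
  have key : ∀ M : Int, M + a - 1 = (M - 1) + 1 * a := by intro M; ring
  by_cases hc : L ≤ a
  · have hL0 : L - a = 0 := by omega
    rw [hL0]
    have : cnt a 0 = 0 := by simp [cnt]
    rw [this]
    unfold cnt
    rw [if_pos hL, key, Int.add_mul_ediv_right _ _ haz,
      Int.ediv_eq_zero_of_lt (by omega) (by exact_mod_cast (by omega : (L:Int) - 1 < (a:Int)))]
    simp
  · have hc' : a < L := by omega
    unfold cnt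
    rw [if_pos hL, if_pos (by omega)]
    have hcast : ((L - a : Nat) : Int) = (L : Int) - (a : Int) := by
      push_cast [Nat.cast_sub (le_of_lt hc')]; ring
    rw [hcast]
    have e1 : (L : Int) + a - 1 = ((L : Int) - a - 1) + 1 * a + 1 * a := by ring
    have e2 : (L : Int) - a + a - 1 = ((L : Int) - a - 1) + 1 * a := by ring
    rw [e1, e2, Int.add_mul_ediv_right _ _ haz, Int.add_mul_ediv_right _ _ haz]
    have hnn : 0 ≤ ((L : Int) - a - 1) / a := Int.ediv_nonneg (by omega) (by omega)
    omega

theorem chunksL_nil (a : Nat) : chunksL a [] = [] := by simp [chunksL, cnt]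

theorem chunksL_cons (a : Nat) (ha : 0 < a) (extra : List String) (hne : extra ≠ []) :
    chunksL a extra = extra.take a :: chunksL a (extra.drop a) := by
  have hL : 0 < extra.length := List.length_pos_iff.mpr hne
  unfold chunksL
  rw [List.length_drop, cnt_step a extra.length ha hL, List.range_succ_eq_map]
  simp only [List.map_cons, List.map_map]
  have hhead : chunkAt extra a 0 = extra.take a := by simp [chunkAt]
  have htail : ∀ j, (chunkAt extra a ∘ Nat.succ) j = chunkAt (extra.drop a) a j := by
    intro j
    simp only [Function.comp_apply, chunkAt]
    rw [List.drop_drop]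
    congr 2
    rw [Nat.mul_succ]
    omega
  rw [hhead]
  congr 1
  exact List.map_congr_left (fun j _ => htail j)

theorem flatten_chunksL (a : Nat) (ha : 0 < a) :
    ∀ (L : Nat) (extra : List String), extra.length ≤ L → (chunksL a extra).flatten = extra := by
  intro L
  induction L with
  | zero =>
      intro extra h
      have : extra = [] := List.eq_nil_of_length_eq_zero (by omega)
      simp [this, chunksL_nil]
  | succ L ih =>
      intro extra h
      by_cases hne : extra = []
      · simp [hne, chunksL_nil]
      · rw [chunksL_cons a ha extra hne]
        have hlen : (extra.drop a).length ≤ L := by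
          have := List.length_pos_iff.mpr hne
          simp only [List.length_drop]; omega
        simp [List.flatten_cons, ih _ hlen]

-- the recursive shape of B's merge pass
def mergeRec : List String → List (List String) → List String
  | [], cs => cs.flatten
  | m :: ms, [] => m :: ms
  | m :: ms, c :: cs => m :: (c ++ mergeRec ms cs)

theorem foldl_flatten (cs : List (List String)) :
    ∀ acc, cs.foldl (fun o c => o ++ c) acc = acc ++ cs.flatten := by
  induction cs with
  | nil => intro acc; simp
  | cons c cs ih => intro acc; simp [ih]

theorem zipfold_eq (ms : List String) :
    ∀ (cs : List (List String)) (out : List String),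
      (((ms.zip cs).foldl (fun o p => (o ++ [p.1]) ++ p.2) out
          ++ ms.drop (min ms.length cs.length))
          ++ (cs.drop (min ms.length cs.length)).foldl (fun o c => o ++ c) [])
        = out ++ mergeRec ms cs := by
  induction ms with
  | nil =>
      intro cs out
      simp [mergeRec, foldl_flatten]
  | cons m ms ih =>
      intro cs out
      cases cs with
      | nil => simp [mergeRec]
      | cons c cs =>
          simp only [List.zip_cons_cons, List.foldl_cons, List.length_cons,
            Nat.succ_min_succ, List.drop_succ_cons]
          rw [ih cs (out ++ [m] ++ c)]
          simp [mergeRec]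

theorem mergeRec_chunksL (a : Nat) (ha : 0 < a) :
    ∀ (main extra : List String), mergeRec main (chunksL a extra) = specF a main extra := by
  intro main
  induction main with
  | nil => intro extra; simpa [mergeRec] using flatten_chunksL a ha extra.length extra le_rfl
  | cons m ms ih =>
      intro extra
      by_cases hne : extra = []
      · simp [hne, chunksL_nil, mergeRec, specF, specF_nil]
      · rw [chunksL_cons a ha extra hne]
        simp [mergeRec, specF, ih]

theorem interleave_alt_eq_specF (main extra : List String) (k : Int) :
    interleave_alt main extra k = specF k.toNat main extra := by
  unfold interleave_alt
  by_cases hk : k ≤ 0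
  · have : k.toNat = 0 := Int.toNat_of_nonpos hk
    rw [if_pos hk, this, specF_zero]
  · have hkpos : 0 < k := by omega
    obtain ⟨a, rfl⟩ : ∃ a : Nat, k = (a : Int) := ⟨k.toNat, (Int.toNat_of_nonneg hkpos.le).symm⟩
    have ha : 0 < a := by exact_mod_cast hkpos
    rw [if_neg hk]
    simp only [chunks_eq extra a ha]
    rw [zipfold_eq main (chunksL a extra) [], List.nil_append,
      mergeRec_chunksL a ha main extra, Int.toNat_natCast]

-- ===== VERDICT (by name: the statement is the Claim_ definition above) =====
theorem interleave_spec : Claim_equal_interleave := by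
  intro main extra k _
  unfold Spec_interleave
  rw [interleave_eq_specF, interleave_alt_eq_specF]
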